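-- pv_equiv track=rewrite | github.com/AbdulkadirUgas/ARC | arc_visualizer/tag_arc_tasks.py | detect_crop_subgrid
-- ===== SOURCE A (Python) =====
-- Grid = list[list[int]]
--
-- def shape(grid: Grid) -> tuple[int, int]:
--     return len(grid), len(grid[0]) if grid else 0
--
-- def grid_equal(a: Grid, b: Grid) -> bool:
--     return a == b
--
-- def detect_crop_subgrid(inp: Grid, out: Grid) -> bool:
--     oh, ow = shape(out)
--     ih, iw = shape(inp)
--     if oh > ih or ow > iw:
--         return False
--     for r0 in range(ih - oh + 1):
--         for c0 in range(iw - ow + 1):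
--             if grid_equal([row[c0 : c0 + ow] for row in inp[r0 : r0 + oh]], out):
--                 return True
--     return False
-- ===== SOURCE B (Python) =====
-- def detect_crop_subgrid(inp, out):
--     oh = len(out)
--     ow = len(out[0]) if out else 0
--     ih = len(inp)
--     iw = len(inp[0]) if inp else 0
--     if oh > ih or ow > iw:
--         return False
--     for r0 in range(ih - oh + 1):
--         # candidate column offsets, narrowed row by row; bail out early when none survive
--         cand = list(range(iw - ow + 1))
--         for row, orow in zip(inp[r0:r0 + oh], out):
--             cand = [c0 for c0 in cand if row[c0:c0 + ow] == orow]
--             if not cand: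
--                 break
--         if cand:
--             return True
--     return False
-- ===== Notes on version B (the rewrite author's own statement) =====
-- stated objective: alternative
-- what changed: Instead of re-slicing and comparing the whole oh x ow window for every (r0,c0) pair, B keeps a shrinking list of candidate column offsets per row band and filters it row by row with an early break once no candidate survives.
import Mathlib
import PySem

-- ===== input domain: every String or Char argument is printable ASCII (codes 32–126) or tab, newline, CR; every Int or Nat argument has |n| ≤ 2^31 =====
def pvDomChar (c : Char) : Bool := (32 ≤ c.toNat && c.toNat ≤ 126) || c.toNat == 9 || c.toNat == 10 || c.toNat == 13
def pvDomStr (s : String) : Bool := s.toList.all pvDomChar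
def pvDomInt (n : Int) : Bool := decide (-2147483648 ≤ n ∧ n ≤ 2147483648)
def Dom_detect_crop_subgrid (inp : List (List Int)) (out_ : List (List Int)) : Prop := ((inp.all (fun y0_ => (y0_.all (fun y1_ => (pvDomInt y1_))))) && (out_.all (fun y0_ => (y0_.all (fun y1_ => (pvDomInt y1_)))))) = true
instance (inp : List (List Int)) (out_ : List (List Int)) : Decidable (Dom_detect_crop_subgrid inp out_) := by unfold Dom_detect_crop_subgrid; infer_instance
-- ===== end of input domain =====

-- B replaces A's full window comparison at every (r0,c0) by per-band candidate-column
-- filtering with an early break; same results, alternative algorithm (no speed claim).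

-- ===== PORT A =====
def detect_crop_subgrid (inp : List (List Int)) (out_ : List (List Int)) : Bool :=
  let oh : Int := out_.length
  let ow : Int := match out_ with | [] => 0 | r :: _ => (r.length : Int)
  let ih : Int := inp.length
  let iw : Int := match inp with | [] => 0 | r :: _ => (r.length : Int)
  if oh > ih ∨ ow > iw then false
  else
    (PySem.List.pyRange 0 (ih - oh + 1) 1).any fun r0 =>
      (PySem.List.pyRange 0 (iw - ow + 1) 1).any fun c0 =>
        ((PySem.List.slice inp (some r0) (some (r0 + oh))).map
          (fun row => PySem.List.slice row (some c0) (some (c0 + ow)))) == out_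

-- ===== PORT B =====
-- B's inner loop: narrow the candidate list row by row, break when empty
def pvFilterRows (ow : Int) : List (List Int × List Int) → List Int → List Int
  | [], cand => cand
  | (row, orow) :: rest, cand =>
      let cand' := cand.filter (fun c0 => PySem.List.slice row (some c0) (some (c0 + ow)) == orow)
      if cand'.isEmpty then cand' else pvFilterRows ow rest cand'

def detect_crop_subgrid_alt (inp : List (List Int)) (out_ : List (List Int)) : Bool :=
  let oh : Int := out_.length
  let ow : Int := match out_ with | [] => 0 | r :: _ => (r.length : Int)
  let ih : Int := inp.length
  let iw : Int := match inp with | [] => 0 | r :: _ => (r.length : Int)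
  if oh > ih ∨ ow > iw then false
  else
    (PySem.List.pyRange 0 (ih - oh + 1) 1).any fun r0 =>
      !(pvFilterRows ow ((PySem.List.slice inp (some r0) (some (r0 + oh))).zip out_)
          (PySem.List.pyRange 0 (iw - ow + 1) 1)).isEmpty

-- ===== PRECONDITION & SPEC =====
def Spec_detect_crop_subgrid (inp : List (List Int)) (out_ : List (List Int)) (out : Bool) : Prop := out = detect_crop_subgrid_alt inp out_
instance (inp : List (List Int)) (out_ : List (List Int)) (out : Bool) : Decidable (Spec_detect_crop_subgrid inp out_ out) := by unfold Spec_detect_crop_subgrid; infer_instance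

-- ===== CLAIM (what is proved, stated in full; the proofs are below) =====
def Claim_equal_detect_crop_subgrid : Prop := ∀ (inp : List (List Int)) (out_ : List (List Int)), Dom_detect_crop_subgrid inp out_ → Spec_detect_crop_subgrid inp out_ (detect_crop_subgrid inp out_)

-- ===== LEMMAS AND PROOFS =====

-- B's break-early filtering equals one filter by the conjunction of all row conditions
theorem pvFilterRows_eq (ow : Int) (pairs : List (List Int × List Int)) (cand : List Int) :
    pvFilterRows ow pairs cand =
      cand.filter (fun c0 => pairs.all (fun p => PySem.List.slice p.1 (some c0) (some (c0 + ow)) == p.2)) := by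
  induction pairs generalizing cand with
  | nil => simp [pvFilterRows]
  | cons p rest ih =>
    obtain ⟨row, orow⟩ := p
    simp only [pvFilterRows, List.all_cons]
    have key :
        cand.filter (fun c0 => (PySem.List.slice row (some c0) (some (c0 + ow)) == orow) &&
            rest.all (fun p => PySem.List.slice p.1 (some c0) (some (c0 + ow)) == p.2)) =
          (cand.filter (fun c0 => PySem.List.slice row (some c0) (some (c0 + ow)) == orow)).filter
            (fun c0 => rest.all (fun p => PySem.List.slice p.1 (some c0) (some (c0 + ow)) == p.2)) := by
      rw [List.filter_filter]
      exact List.filter_congr (fun x _ => Bool.and_comm _ _)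
    rw [key]
    by_cases h : (cand.filter (fun c0 => PySem.List.slice row (some c0) (some (c0 + ow)) == orow)).isEmpty
    · rw [if_pos h]
      rw [List.isEmpty_iff] at h
      rw [h]
      rfl
    · rw [if_neg h, ih]

-- grid equality via map ↔ pointwise over the zip, when lengths agree
theorem map_eq_iff_zip (f : List Int → List Int) :
    ∀ (ws os : List (List Int)), ws.length = os.length →
      (ws.map f = os ↔ ∀ p ∈ ws.zip os, f p.1 = p.2) := by
  intro ws
  induction ws with
  | nil => intro os h; cases os <;> simp at h ⊢
  | cons w ws ih =>
    intro os h
    cases os with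
    | nil => simp at h
    | cons o os =>
      simp only [List.length_cons, Nat.add_right_cancel_iff] at h
      simp [List.zip_cons_cons, ih os h]

-- the sliced window has exactly out_.length rows for r0 in the scanned range
theorem window_length (inp : List (List Int)) (oh r0 : Int) (h0 : 0 ≤ r0)
    (h1 : 0 ≤ oh) (h2 : r0 + oh ≤ (inp.length : Int)) :
    (PySem.List.slice inp (some r0) (some (r0 + oh))).length = oh.toNat := by
  rw [PySem.List.slice_toNat _ h0 (by omega)]
  simp only [List.length_take, List.length_drop]
  omega

theorem pvAnyCongr {α : Type} (l : List α) (p q : α → Bool)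
    (h : ∀ a ∈ l, p a = q a) : l.any p = l.any q := by
  induction l with
  | nil => rfl
  | cons x xs ih =>
    simp only [List.any_cons, h x (List.mem_cons_self),
      ih (fun a ha => h a (List.mem_cons_of_mem x ha))]

theorem pvFilterNonempty (p : Int → Bool) (l : List Int) :
    (!(l.filter p).isEmpty) = l.any p := by
  rw [Bool.eq_iff_iff]
  simp [List.filter_eq_nil_iff, List.any_eq_true]

theorem detect_crop_subgrid_eq (inp : List (List Int)) (out_ : List (List Int)) :
    detect_crop_subgrid inp out_ = detect_crop_subgrid_alt inp out_ := by
  unfold detect_crop_subgrid detect_crop_subgrid_alt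
  by_cases hg : ((out_.length : Int) > (inp.length : Int) ∨
      (match out_ with | [] => (0:Int) | r :: _ => (r.length : Int)) >
      (match inp with | [] => (0:Int) | r :: _ => (r.length : Int)))
  · rw [if_pos hg, if_pos hg]
  · rw [if_neg hg, if_neg hg]
    apply pvAnyCongr
    intro r0 hr0
    rw [PySem.List.mem_pyRange_one] at hr0
    have hw : (PySem.List.slice inp (some r0) (some (r0 + (out_.length : Int)))).length
        = out_.length := by
      rw [window_length inp (out_.length : Int) r0 hr0.1 (by omega) (by omega)]
      omega
    rw [pvFilterRows_eq, pvFilterNonempty]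
    apply pvAnyCongr
    intro c0 _
    rw [Bool.eq_iff_iff, beq_iff_eq, List.all_eq_true, map_eq_iff_zip _ _ _ hw]
    constructor
    · intro h p hp; rw [beq_iff_eq]; exact h p hp
    · intro h p hp; have := h p hp; rwa [beq_iff_eq] at this

-- ===== VERDICT (by name: the statement is the Claim_ definition above) =====
theorem detect_crop_subgrid_spec : Claim_equal_detect_crop_subgrid := by
  intro inp out_ _
  exact detect_crop_subgrid_eq inp out_
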